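-- pv_equiv track=rewrite | github.com/codingismycraft/codingismycraft | algorithms/remove_islands/remove_islands.py | _make_graph_from_adjacency_list
-- ===== SOURCE A (Python) =====
-- def _make_name(row_index, col_index):
--     """Converts the pair of row - col index to a name.
--
--     :param int row_index: The row index.
--     :param int col_index: The col index.
--
--     :return: A name representing the passed in row-index pair.
--     :rtype: str
--     """
--     return f'{col_index}:{row_index}'
--
-- def _add_to_graph(g, item1, item2):
--     """Adds the passed in pair of items to the graph.
--
--     :param dict g: The graph to update.
--     :param item1: The item to add to the graph.
--     :param item2: The item to add to item1.
--     """
--     if item1 not in g: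
--         g[item1] = set()
--     g[item1].add(item2)
--
-- def _make_graph_from_adjacency_list(matrix):
--     """Converts the passed in matrix to a graph.
--
--     :param list[list] matrix: The matrix representing the islands as 0 and 1.
--
--     :return: The corresponding graph as a dict.
--     :rtype: dict.
--     """
--     num_rows = len(matrix)
--     num_cols = len(matrix[0])
--
--     adjacent_pairs = []
--     graph = {}
--     for row in range(0, num_rows):
--         for column in range(0, num_cols):
--             if matrix[row][column] == 0:
--                 continue
--
--             connected_items = []
--
--             # Add the "up" item.
--             if row >= 1 and matrix[row - 1][column] == 1:
--                 assert row - 1 >= 0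
--                 connected_items.append(_make_name(row - 1, column))
--
--             # Add the "down" item.
--             if row < num_rows - 1 and matrix[row + 1][column] == 1:
--                 assert row + 1 < num_rows
--                 connected_items.append(_make_name(row + 1, column))
--
--             # Add the "left" item.
--             if column >= 1 and matrix[row][column - 1] == 1:
--                 assert column - 1 >= 0
--                 connected_items.append(_make_name(row, column - 1))
--
--             # Add the "right" item.
--             if column < num_rows - 1 and matrix[row][column + 1] == 1:
--                 assert column + 1 < num_rows
--                 connected_items.append(_make_name(row, column + 1))
--
--             this_item = _make_name(row, column)
--
--             if not connected_items:
--                 graph[this_item] = set()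
--
--             for item in connected_items:
--                 adjacent_pairs.append((this_item, item))
--
--     for item1, item2 in adjacent_pairs:
--         _add_to_graph(graph, item1, item2)
--         _add_to_graph(graph, item2, item1)
--     return graph
-- ===== SOURCE B (Python) =====
-- # Declarative re-implementation: instead of mutating a dict while replaying a
-- # deferred pair list, compute the key order (first occurrence in the
-- # isolated-names + edge-name stream) and each adjacency set (a scan over the
-- # pair list) directly.  A's neighbour bounds are kept verbatim (including the
-- # right-neighbour bound num_rows - 1) because the result must be identical.
-- def _make_graph_from_adjacency_list(matrix):
--     num_rows = len(matrix)
--     num_cols = len(matrix[0])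
--
--     def neighbors(row, col):
--         candidates = [(row - 1, col), (row + 1, col), (row, col - 1), (row, col + 1)]
--         in_bounds = [row >= 1, row < num_rows - 1, col >= 1, col < num_rows - 1]
--         return [(r, c) for (r, c), ok in zip(candidates, in_bounds)
--                 if ok and matrix[r][c] == 1]
--
--     active = [(r, c) for r in range(num_rows) for c in range(num_cols)
--               if matrix[r][c] != 0]
--     isolated = [f'{c}:{r}' for (r, c) in active if not neighbors(r, c)]
--     pairs = [(f'{c}:{r}', f'{nc}:{nr}')
--              for (r, c) in active for (nr, nc) in neighbors(r, c)]
--     names = list(dict.fromkeys(isolated + [n for pair in pairs for n in pair]))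
--
--     def partners(name):
--         linked = []
--         for first, second in pairs:
--             if first == name:
--                 linked.append(second)
--             elif second == name:
--                 linked.append(first)
--         return linked
--
--     return {name: set(partners(name)) for name in names}
-- ===== Notes on version B (the rewrite author's own statement) =====
-- stated objective: alternative
-- what changed: A incrementally mutates a dict by replaying a deferred adjacent-pairs list; B is declarative: it builds the active-cell, isolated-name and pair lists by comprehensions, computes the key order as the first-occurrence dedup of the isolated-names-plus-edge-name stream, and computes each adjacency set by a direct scan of the pair list, assembling the result dict in one comprehension.
import Mathlib
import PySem

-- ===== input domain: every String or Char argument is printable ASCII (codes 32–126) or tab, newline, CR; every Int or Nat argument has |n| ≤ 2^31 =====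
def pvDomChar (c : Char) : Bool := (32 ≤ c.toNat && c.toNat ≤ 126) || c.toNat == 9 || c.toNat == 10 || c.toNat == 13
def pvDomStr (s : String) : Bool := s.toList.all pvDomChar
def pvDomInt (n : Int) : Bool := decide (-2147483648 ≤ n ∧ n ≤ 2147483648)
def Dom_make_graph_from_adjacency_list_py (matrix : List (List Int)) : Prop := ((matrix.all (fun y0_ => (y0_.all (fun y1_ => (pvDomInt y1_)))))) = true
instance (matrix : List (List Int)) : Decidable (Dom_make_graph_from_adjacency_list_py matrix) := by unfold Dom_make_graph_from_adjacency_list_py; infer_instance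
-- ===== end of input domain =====

-- B replaces A's deferred-pair replay with a mutation-free description: key order =
-- first occurrences of the isolated-name + edge-name stream, each adjacency set = a
-- direct scan of the pair list ("alternative" objective, not faster).
-- All subscripts are in range under Pre_ (which admits exactly the inputs where A
-- returns), so pyGetD with a default is exact there.

-- ===== PORT A =====
-- port of _make_name
def pvName (row_index col_index : Int) : String :=
  PySem.Int.toStr col_index ++ ":" ++ PySem.Int.toStr row_index

-- port of _add_to_graph
def pvAddToGraph (g : PySem.Dict String (PySem.Set String)) (item1 item2 : String) :
    PySem.Dict String (PySem.Set String) :=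
  let g := g.setdefault item1 PySem.Set.empty
  g.modify item1 PySem.Set.empty (fun s => PySem.Set.add s item2)

-- the connected_items list A builds for one non-zero cell (the four if-blocks)
def pvConnected (matrix : List (List Int)) (num_rows row column : Int) : List String :=
  let connected_items : List String := []
  let connected_items :=
    if decide (1 ≤ row) && (PySem.List.pyGetD (PySem.List.pyGetD matrix (row - 1) []) column 0 == 1)
    then connected_items ++ [pvName (row - 1) column] else connected_items
  let connected_items :=
    if decide (row < num_rows - 1) && (PySem.List.pyGetD (PySem.List.pyGetD matrix (row + 1) []) column 0 == 1)
    then connected_items ++ [pvName (row + 1) column] else connected_items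
  let connected_items :=
    if decide (1 ≤ column) && (PySem.List.pyGetD (PySem.List.pyGetD matrix row []) (column - 1) 0 == 1)
    then connected_items ++ [pvName row (column - 1)] else connected_items
  let connected_items :=
    if decide (column < num_rows - 1) && (PySem.List.pyGetD (PySem.List.pyGetD matrix row []) (column + 1) 0 == 1)
    then connected_items ++ [pvName row (column + 1)] else connected_items
  connected_items

-- the body of A's inner loop (state = (graph, adjacent_pairs))
def pvCellStep (matrix : List (List Int)) (num_rows row column : Int)
    (st : PySem.Dict String (PySem.Set String) × List (String × String)) :
    PySem.Dict String (PySem.Set String) × List (String × String) :=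
  if PySem.List.pyGetD (PySem.List.pyGetD matrix row []) column 0 == 0 then st
  else
    let connected_items := pvConnected matrix num_rows row column
    let this_item := pvName row column
    let graph := if connected_items.isEmpty then st.1.insert this_item PySem.Set.empty else st.1
    let adjacent_pairs :=
      connected_items.foldl (fun ps item => ps ++ [(this_item, item)]) st.2
    (graph, adjacent_pairs)

def make_graph_from_adjacency_list_py (matrix : List (List Int)) : List (String × List String) :=
  let num_rows : Int := (matrix.length : Int)
  let num_cols : Int := ((PySem.List.pyGetD matrix 0 []).length : Int)
  let st :=
    (PySem.List.pyRange 0 num_rows).foldl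
      (fun st row =>
        (PySem.List.pyRange 0 num_cols).foldl
          (fun st column => pvCellStep matrix num_rows row column st) st)
      ((PySem.Dict.empty : PySem.Dict String (PySem.Set String)), ([] : List (String × String)))
  let graph :=
    st.2.foldl (fun g p => pvAddToGraph (pvAddToGraph g p.1 p.2) p.2 p.1) st.1
  graph.items

-- ===== PORT B =====
-- port of B's neighbors(row, col) helper
def pvNeighbors (matrix : List (List Int)) (num_rows row col : Int) : List (Int × Int) :=
  let candidates : List (Int × Int) := [(row - 1, col), (row + 1, col), (row, col - 1), (row, col + 1)]
  let in_bounds : List Bool :=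
    [decide (1 ≤ row), decide (row < num_rows - 1), decide (1 ≤ col), decide (col < num_rows - 1)]
  ((candidates.zip in_bounds).filter
      (fun pc => pc.2 && (PySem.List.pyGetD (PySem.List.pyGetD matrix pc.1.1 []) pc.1.2 0 == 1))).map
    (fun pc => pc.1)

-- port of B's partners(name) helper
def pvPartners (pairs : List (String × String)) (name : String) : List String :=
  pairs.foldl
    (fun linked p =>
      if p.1 == name then linked ++ [p.2]
      else if p.2 == name then linked ++ [p.1]
      else linked) []

def make_graph_from_adjacency_list_py_alt (matrix : List (List Int)) : List (String × List String) :=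
  let num_rows : Int := (matrix.length : Int)
  let num_cols : Int := ((PySem.List.pyGetD matrix 0 []).length : Int)
  let active : List (Int × Int) :=
    (PySem.List.pyRange 0 num_rows).flatMap (fun r =>
      ((PySem.List.pyRange 0 num_cols).filter
          (fun c => !(PySem.List.pyGetD (PySem.List.pyGetD matrix r []) c 0 == 0))).map (fun c => (r, c)))
  let isolated : List String :=
    (active.filter (fun p => (pvNeighbors matrix num_rows p.1 p.2).isEmpty)).map (fun p => pvName p.1 p.2)
  let pairs : List (String × String) :=
    active.flatMap (fun p =>
      (pvNeighbors matrix num_rows p.1 p.2).map (fun q => (pvName p.1 p.2, pvName q.1 q.2)))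
  let names : List String :=
    PySem.List.dedup (isolated ++ pairs.flatMap (fun pr => [pr.1, pr.2]))
  (PySem.Dict.ofList (names.map (fun n => (n, PySem.Set.ofList (pvPartners pairs n))))).items

-- ===== PRECONDITION & SPEC =====
-- Pre_ admits exactly the inputs on which the Python A returns: a non-empty matrix,
-- no row shorter than row 0 (the scan indexes every column of row 0's length), and —
-- because A's right-neighbour test is bounded by num_rows-1 instead of num_cols-1 —
-- when the matrix is taller than row 0 is wide, no row may hold a non-zero entry in
-- column len(row0)-1 unless that row extends past len(row0) (else IndexError).
def Pre_make_graph_from_adjacency_list_py (matrix : List (List Int)) : Prop :=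
  matrix ≠ [] ∧
  (∀ row ∈ matrix, (matrix.headD []).length ≤ row.length) ∧
  ((matrix.headD []).length < matrix.length →
    ∀ row ∈ matrix, row.getD ((matrix.headD []).length - 1) 0 ≠ 0 →
      (matrix.headD []).length < row.length)
instance (matrix : List (List Int)) : Decidable (Pre_make_graph_from_adjacency_list_py matrix) := by
  unfold Pre_make_graph_from_adjacency_list_py; infer_instance

def pvWitness_make_graph_from_adjacency_list_py : List (List Int) := [[1, 1], [0, 1]]

def Spec_make_graph_from_adjacency_list_py (matrix : List (List Int)) (out : List (String × List String)) : Prop :=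
  out = make_graph_from_adjacency_list_py_alt matrix
instance (matrix : List (List Int)) (out : List (String × List String)) :
    Decidable (Spec_make_graph_from_adjacency_list_py matrix out) := by
  unfold Spec_make_graph_from_adjacency_list_py; infer_instance

-- ===== CLAIM (what is proved, stated in full; the proofs are below) =====
def Claim_equal_make_graph_from_adjacency_list_py : Prop :=
  ∀ (matrix : List (List Int)), Dom_make_graph_from_adjacency_list_py matrix →
    Pre_make_graph_from_adjacency_list_py matrix →
      Spec_make_graph_from_adjacency_list_py matrix (make_graph_from_adjacency_list_py matrix)

-- ===== LEMMAS AND PROOFS =====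

-- one pair's contribution to the neighbour list of the key `k`
def pvContrib (k : String) (p : String × String) : List String :=
  if p.1 == k then [p.2] else if p.2 == k then [p.1] else []

-- one pair's processing step in A's second loop
def pvAddBoth (g : PySem.Dict String (PySem.Set String)) (p : String × String) :
    PySem.Dict String (PySem.Set String) :=
  pvAddToGraph (pvAddToGraph g p.1 p.2) p.2 p.1

-- the active / isolated / pair lists of one row, over an arbitrary column list
def pvActRow (matrix : List (List Int)) (row : Int) (cols : List Int) : List Int :=
  cols.filter (fun c => !(PySem.List.pyGetD (PySem.List.pyGetD matrix row []) c 0 == 0))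

def pvIsoRow (matrix : List (List Int)) (num_rows row : Int) (cols : List Int) : List String :=
  ((pvActRow matrix row cols).filter (fun c => (pvNeighbors matrix num_rows row c).isEmpty)).map
    (fun c => pvName row c)

def pvPrsRow (matrix : List (List Int)) (num_rows row : Int) (cols : List Int) : List (String × String) :=
  (pvActRow matrix row cols).flatMap (fun c =>
    (pvNeighbors matrix num_rows row c).map (fun q => (pvName row c, pvName q.1 q.2)))

lemma pvConnected_eq (matrix : List (List Int)) (num_rows row column : Int) :
    pvConnected matrix num_rows row column
      = (pvNeighbors matrix num_rows row column).map (fun q => pvName q.1 q.2) := by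
  unfold pvConnected pvNeighbors
  simp only [List.zip, List.zipWith, List.filter]
  cases h1 : decide (1 ≤ row) && (PySem.List.pyGetD (PySem.List.pyGetD matrix (row - 1) []) column 0 == 1) <;>
  cases h2 : decide (row < num_rows - 1) && (PySem.List.pyGetD (PySem.List.pyGetD matrix (row + 1) []) column 0 == 1) <;>
  cases h3 : decide (1 ≤ column) && (PySem.List.pyGetD (PySem.List.pyGetD matrix row []) (column - 1) 0 == 1) <;>
  cases h4 : decide (column < num_rows - 1) && (PySem.List.pyGetD (PySem.List.pyGetD matrix row []) (column + 1) 0 == 1) <;>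
  simp

lemma pvScan_cols (matrix : List (List Int)) (num_rows row : Int) (cols : List Int)
    (g : PySem.Dict String (PySem.Set String)) (ps : List (String × String)) :
    cols.foldl (fun st c => pvCellStep matrix num_rows row c st) (g, ps)
      = ((pvIsoRow matrix num_rows row cols).foldl (fun d k => d.insert k PySem.Set.empty) g,
         ps ++ pvPrsRow matrix num_rows row cols) := by
  induction cols generalizing g ps with
  | nil => simp [pvIsoRow, pvPrsRow, pvActRow]
  | cons c rest ih =>
    simp only [List.foldl_cons]
    by_cases h0 : (PySem.List.pyGetD (PySem.List.pyGetD matrix row []) c 0 == 0) = true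
    · rw [show pvCellStep matrix num_rows row c (g, ps) = (g, ps) by
        unfold pvCellStep; rw [if_pos h0]]
      rw [ih]
      simp [pvIsoRow, pvPrsRow, pvActRow, h0]
    · have hstep : pvCellStep matrix num_rows row c (g, ps)
        = ((if (pvNeighbors matrix num_rows row c).isEmpty
              then g.insert (pvName row c) PySem.Set.empty else g),
           ps ++ (pvNeighbors matrix num_rows row c).map (fun q => (pvName row c, pvName q.1 q.2))) := by
        unfold pvCellStep
        rw [if_neg h0, pvConnected_eq]
        simp only [PySem.List.foldl_append_singleton_eq_map, List.map_map]
        simp [Function.comp]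
      rw [hstep, ih]
      by_cases hiso : (pvNeighbors matrix num_rows row c).isEmpty = true
      · simp [pvIsoRow, pvPrsRow, pvActRow, h0, List.isEmpty_iff.mp hiso]
      · simp [pvIsoRow, pvPrsRow, pvActRow, h0, hiso]

lemma pvScan_rows (matrix : List (List Int)) (num_rows : Int) (rows cols : List Int)
    (g : PySem.Dict String (PySem.Set String)) (ps : List (String × String)) :
    rows.foldl (fun st r =>
        cols.foldl (fun st c => pvCellStep matrix num_rows r c st) st) (g, ps)
      = ((rows.flatMap (fun r => pvIsoRow matrix num_rows r cols)).foldl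
           (fun d k => d.insert k PySem.Set.empty) g,
         ps ++ rows.flatMap (fun r => pvPrsRow matrix num_rows r cols)) := by
  induction rows generalizing g ps with
  | nil => simp
  | cons r rest ih =>
    simp only [List.foldl_cons, pvScan_cols, ih, List.flatMap_cons, List.foldl_append,
      List.append_assoc]

lemma pvGetD_graph0 (iso : List String) (d : PySem.Dict String (PySem.Set String))
    (h : ∀ k, d.getD k ([] : PySem.Set String) = []) (k : String) :
    (iso.foldl (fun d k => d.insert k PySem.Set.empty) d).getD k ([] : PySem.Set String) = [] := by
  induction iso generalizing d with
  | nil => exact h k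
  | cons a rest ih =>
    simp only [List.foldl_cons]
    refine ih _ (fun k' => ?_)
    rw [PySem.Dict.getD_insert]
    split
    · rfl
    · exact h k'

lemma pvGetD_addBoth (g : PySem.Dict String (PySem.Set String)) (p : String × String) (k : String) :
    (pvAddBoth g p).getD k ([] : PySem.Set String)
      = PySem.Set.update (g.getD k ([] : PySem.Set String)) (pvContrib k p) := by
  obtain ⟨a, b⟩ := p
  unfold pvAddBoth pvAddToGraph pvContrib
  simp only [PySem.Set.empty]
  by_cases hka : k = a <;> by_cases hkb : k = b
  · -- k = a = b
    subst hka; subst hkb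
    rw [PySem.Dict.getD_modify, if_pos rfl, PySem.Dict.getD_setdefault_self,
      PySem.Dict.getD_modify, if_pos rfl, PySem.Dict.getD_setdefault_self]
    simp only [beq_self_eq_true, if_pos]
    rw [PySem.Set.update_cons, PySem.Set.update_nil]
    exact PySem.Set.add_of_mem ((PySem.Set.mem_add _ _ _).mpr (Or.inr rfl))
  · subst hka
    rw [PySem.Dict.getD_modify, if_neg hkb,
      PySem.Dict.getD_eq_get?_getD, PySem.Dict.get?_setdefault_of_ne _ _ hkb,
      ← PySem.Dict.getD_eq_get?_getD,
      PySem.Dict.getD_modify, if_pos rfl, PySem.Dict.getD_setdefault_self]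
    simp only [beq_self_eq_true, if_pos]
    rw [PySem.Set.update_cons, PySem.Set.update_nil]
  · subst hkb
    rw [PySem.Dict.getD_modify, if_pos rfl, PySem.Dict.getD_setdefault_self,
      PySem.Dict.getD_modify, if_neg hka,
      PySem.Dict.getD_eq_get?_getD, PySem.Dict.get?_setdefault_of_ne _ _ hka,
      ← PySem.Dict.getD_eq_get?_getD]
    have h1 : ¬(a == k) = true := by
      simp only [beq_iff_eq]; exact fun h => hka h.symm
    rw [if_neg h1]
    simp only [beq_self_eq_true, if_pos]
    rw [PySem.Set.update_cons, PySem.Set.update_nil]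
  · rw [PySem.Dict.getD_modify, if_neg hkb,
      PySem.Dict.getD_eq_get?_getD, PySem.Dict.get?_setdefault_of_ne _ _ hkb,
      ← PySem.Dict.getD_eq_get?_getD,
      PySem.Dict.getD_modify, if_neg hka,
      PySem.Dict.getD_eq_get?_getD, PySem.Dict.get?_setdefault_of_ne _ _ hka,
      ← PySem.Dict.getD_eq_get?_getD]
    have h1 : ¬(a == k) = true := by
      simp only [beq_iff_eq]; exact fun h => hka h.symm
    have h2 : ¬(b == k) = true := by
      simp only [beq_iff_eq]; exact fun h => hkb h.symm
    rw [if_neg h1, if_neg h2, PySem.Set.update_nil]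

lemma pvGetD_foldl_addBoth (q : List (String × String)) (g : PySem.Dict String (PySem.Set String)) (k : String) :
    (q.foldl pvAddBoth g).getD k ([] : PySem.Set String)
      = PySem.Set.update (g.getD k ([] : PySem.Set String)) (q.flatMap (pvContrib k)) := by
  induction q generalizing g with
  | nil => simp [PySem.Set.update_nil]
  | cons p rest ih =>
    simp only [List.foldl_cons, List.flatMap_cons, PySem.Set.update_append, ih,
      pvGetD_addBoth]

lemma pvKeys_addBoth (g : PySem.Dict String (PySem.Set String)) (p : String × String) :
    (pvAddBoth g p).keys = PySem.Set.add (PySem.Set.add g.keys p.1) p.2 := by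
  obtain ⟨a, b⟩ := p
  unfold pvAddBoth pvAddToGraph
  have hmod : ∀ (d : PySem.Dict String (PySem.Set String)) (x : String),
      ((d.setdefault x PySem.Set.empty).modify x PySem.Set.empty
        (fun s => PySem.Set.add s b)).keys = PySem.Set.add d.keys x ∧
      ((d.setdefault x PySem.Set.empty).modify x PySem.Set.empty
        (fun s => PySem.Set.add s a)).keys = PySem.Set.add d.keys x := by
    intro d x
    constructor <;>
    · rw [PySem.Dict.keys_modify, PySem.Dict.keys_insert_of_contains _ _
        (by rw [PySem.Dict.contains_setdefault]; simp),
        PySem.Dict.keys_setdefault, PySem.Set.add_eq_ite,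
        PySem.Dict.contains_eq_decide_mem_keys]
      by_cases hx : x ∈ d.keys <;> simp [hx]
  rw [(hmod _ b).2, (hmod g a).1]

lemma pvKeys_foldl_addBoth (q : List (String × String)) (g : PySem.Dict String (PySem.Set String)) :
    (q.foldl pvAddBoth g).keys = PySem.Set.update g.keys (q.flatMap (fun p => [p.1, p.2])) := by
  induction q generalizing g with
  | nil => simp [PySem.Set.update_nil]
  | cons p rest ih =>
    simp only [List.foldl_cons, List.flatMap_cons, ih, pvKeys_addBoth, List.cons_append,
      List.nil_append]
    rw [PySem.Set.update_cons, PySem.Set.update_cons]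

lemma pvPartners_eq_flatMap (pairs : List (String × String)) (k : String) :
    pvPartners pairs k = pairs.flatMap (pvContrib k) := by
  unfold pvPartners
  have hfn : (fun (linked : List String) (p : String × String) =>
      if p.1 == k then linked ++ [p.2]
      else if p.2 == k then linked ++ [p.1]
      else linked) = fun linked p => linked ++ pvContrib k p := by
    funext linked p
    unfold pvContrib
    split <;> [skip; split] <;> simp
  rw [hfn, PySem.List.foldl_append_eq_flatMap]
  simp

-- ===== VERDICT (by name: the statement is the Claim_ definition above) =====
theorem make_graph_from_adjacency_list_py_spec : Claim_equal_make_graph_from_adjacency_list_py := by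
  intro matrix _ _
  unfold Spec_make_graph_from_adjacency_list_py
  simp only [make_graph_from_adjacency_list_py, make_graph_from_adjacency_list_py_alt]
  rw [show (fun (g : PySem.Dict String (PySem.Set String)) (p : String × String) =>
      pvAddToGraph (pvAddToGraph g p.1 p.2) p.2 p.1) = pvAddBoth from rfl]
  rw [pvScan_rows]
  simp only [List.nil_append]
  set R : Int := (matrix.length : Int) with hR
  set C : Int := ((PySem.List.pyGetD matrix 0 []).length : Int) with hC
  set rows : List Int := PySem.List.pyRange 0 R with hrows
  set cols : List Int := PySem.List.pyRange 0 C with hcols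
  set iso : List String := rows.flatMap (fun r => pvIsoRow matrix R r cols) with hiso
  set prs : List (String × String) := rows.flatMap (fun r => pvPrsRow matrix R r cols) with hprs
  set graph0 : PySem.Dict String (PySem.Set String) :=
    iso.foldl (fun d k => d.insert k PySem.Set.empty) PySem.Dict.empty with hgraph0
  -- characterisation of A's result
  have hkeys0 : graph0.keys = PySem.Set.ofList iso := by
    rw [hgraph0, PySem.Dict.keys_foldl_insert iso (fun _ _ => PySem.Set.empty) PySem.Dict.empty,
      PySem.Dict.keys_empty, PySem.Set.update_nil_left]
  have hkeys : (List.foldl pvAddBoth graph0 prs).keys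
      = PySem.Set.update (PySem.Set.ofList iso) (prs.flatMap (fun p => [p.1, p.2])) := by
    rw [pvKeys_foldl_addBoth, hkeys0]
  have hnodup : (List.foldl pvAddBoth graph0 prs).keys.Nodup := by
    rw [hkeys]; exact PySem.Set.nodup_update _ _ (PySem.Set.nodup_ofList _)
  have hval : ∀ k, (List.foldl pvAddBoth graph0 prs).getD k ([] : PySem.Set String)
      = PySem.Set.ofList (pvPartners prs k) := by
    intro k
    rw [pvGetD_foldl_addBoth, hgraph0,
      pvGetD_graph0 _ _ (fun k' => PySem.Dict.getD_empty k' _),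
      PySem.Set.update_nil_left, pvPartners_eq_flatMap]
  rw [PySem.Dict.items_eq_map_keys _ hnodup ([] : PySem.Set String), hkeys]
  rw [show (fun k => (k, (List.foldl pvAddBoth graph0 prs).getD k ([] : PySem.Set String)))
      = (fun k => (k, PySem.Set.ofList (pvPartners prs k))) from funext (fun k => by rw [hval k])]
  -- B's lists coincide with A's
  have hisoB : ((rows.flatMap (fun r =>
        ((cols.filter (fun c => !(PySem.List.pyGetD (PySem.List.pyGetD matrix r []) c 0 == 0))).map
          (fun c => (r, c))))).filter
            (fun p => (pvNeighbors matrix R p.1 p.2).isEmpty)).map (fun p => pvName p.1 p.2)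
      = iso := by
    rw [hiso]
    simp only [List.filter_flatMap, List.map_flatMap, List.filter_map, List.map_map]
    simp [pvIsoRow, pvActRow, Function.comp_def]
  have hprsB : (rows.flatMap (fun r =>
        ((cols.filter (fun c => !(PySem.List.pyGetD (PySem.List.pyGetD matrix r []) c 0 == 0))).map
          (fun c => (r, c))))).flatMap
            (fun p => (pvNeighbors matrix R p.1 p.2).map (fun q => (pvName p.1 p.2, pvName q.1 q.2)))
      = prs := by
    rw [hprs]
    simp only [List.flatMap_assoc, List.flatMap_map]
    simp [pvPrsRow, pvActRow]
  rw [hisoB, hprsB]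
  -- B's dict-of-distinct-keys comprehension is its own item list
  have hnames : PySem.List.dedup (iso ++ prs.flatMap (fun pr => [pr.1, pr.2]))
      = PySem.Set.update (PySem.Set.ofList iso) (prs.flatMap (fun p => [p.1, p.2])) := by
    rw [PySem.List.dedup_eq_ofList, PySem.Set.ofList_append]
  rw [hnames]
  have hitems : ∀ (names : List String), names.Nodup →
      (PySem.Dict.ofList (names.map (fun n => (n, PySem.Set.ofList (pvPartners prs n))))).items
        = names.map (fun n => (n, PySem.Set.ofList (pvPartners prs n))) := by
    intro names hnd
    unfold PySem.Dict.ofList PySem.Dict.update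
    rw [PySem.Dict.items_foldl_insert_fresh _ Prod.fst Prod.snd PySem.Dict.empty
      (fun a _ => PySem.Dict.contains_empty _) (by simpa [Function.comp_def] using hnd)]
    simp [Function.comp_def, PySem.Dict.empty]
  rw [hitems _ (PySem.Set.nodup_update _ _ (PySem.Set.nodup_ofList _))]
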